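-- pv_equiv track=rewrite | github.com/MilesJones18/PROG_1 | 3.OctInClass/IS_Oct18_InClassChallenge.py | myDictionary
-- ===== SOURCE A (Python) =====
-- def myDictionary(request):
--     vehicles = {'Ford':['Mustang','F-150','GT40',
--                         'Bronco'],
--                 'Chevy':['Silverado', 'Corvette','Equinox'
--                          'Cruise'],
--                 'Toyota':['Camry','Corolla','Supra',
--                           'Tundra']}
--
--     for brand, model in vehicles.items():
--         if request in model:
--             return brand
-- ===== SOURCE B (Python) =====
-- def myDictionary(request):
--     vehicles = {'Ford':['Mustang','F-150','GT40',
--                         'Bronco'],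
--                 'Chevy':['Silverado', 'Corvette','Equinox'
--                          'Cruise'],
--                 'Toyota':['Camry','Corolla','Supra',
--                           'Tundra']}
--     model_to_brand = {}
--     for brand, models in vehicles.items():
--         for m in models:
--             model_to_brand[m] = brand
--     return model_to_brand.get(request)
-- ===== Notes on version B (the rewrite author's own statement) =====
-- stated objective: idiomatic
-- what changed: Replaces the brand-by-brand scan with list-membership tests by building a reverse model-to-brand dictionary once and answering with a single .get lookup.
import Mathlib
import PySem

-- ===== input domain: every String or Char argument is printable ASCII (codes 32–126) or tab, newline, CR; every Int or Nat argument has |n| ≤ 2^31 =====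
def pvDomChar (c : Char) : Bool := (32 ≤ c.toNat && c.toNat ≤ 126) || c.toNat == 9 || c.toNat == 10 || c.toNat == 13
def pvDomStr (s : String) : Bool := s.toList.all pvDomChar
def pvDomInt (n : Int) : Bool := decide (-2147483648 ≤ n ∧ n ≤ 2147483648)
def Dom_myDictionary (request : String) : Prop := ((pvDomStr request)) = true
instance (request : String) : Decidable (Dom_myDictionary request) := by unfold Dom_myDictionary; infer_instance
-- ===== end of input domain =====

-- B replaces A's brand-by-brand membership scan with a reverse model->brand dictionary built once and a single lookup (idiomatic; same return value).
-- ===== PORT A =====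
def pvVehicles : List (String × List String) :=
  [("Ford", ["Mustang", "F-150", "GT40", "Bronco"]),
   ("Chevy", ["Silverado", "Corvette", "EquinoxCruise"]),
   ("Toyota", ["Camry", "Corolla", "Supra", "Tundra"])]

-- the for-loop with early return over vehicles.items()
def pvFindBrand (request : String) : List (String × List String) → Option String
  | [] => none
  | (brand, model) :: rest =>
      if model.contains request then some brand else pvFindBrand request rest

def myDictionary (request : String) : Option String :=
  pvFindBrand request pvVehicles

-- ===== PORT B =====
-- build model_to_brand by the nested for-loops, then a single .get lookup
def pvModelToBrand : PySem.Dict String String :=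
  pvVehicles.foldl
    (fun d bm => bm.2.foldl (fun d m => d.insert m bm.1) d)
    PySem.Dict.empty

def myDictionary_alt (request : String) : Option String :=
  pvModelToBrand.get? request

-- ===== PRECONDITION & SPEC =====
def Spec_myDictionary (request : String) (out : Option String) : Prop := out = myDictionary_alt request
instance (request : String) (out : Option String) : Decidable (Spec_myDictionary request out) := by unfold Spec_myDictionary; infer_instance

-- ===== CLAIM (what is proved, stated in full; the proofs are below) =====
def Claim_equal_myDictionary : Prop := ∀ (request : String), Dom_myDictionary request → Spec_myDictionary request (myDictionary request)

-- ===== LEMMAS AND PROOFS =====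

-- ===== VERDICT (by name: the statement is the Claim_ definition above) =====
theorem myDictionary_spec : Claim_equal_myDictionary := by
  intro r _
  unfold Spec_myDictionary myDictionary myDictionary_alt
  by_cases h0 : r = "Mustang"
  · subst h0; decide
  by_cases h1 : r = "F-150"
  · subst h1; decide
  by_cases h2 : r = "GT40"
  · subst h2; decide
  by_cases h3 : r = "Bronco"
  · subst h3; decide
  by_cases h4 : r = "Silverado"
  · subst h4; decide
  by_cases h5 : r = "Corvette"
  · subst h5; decide
  by_cases h6 : r = "EquinoxCruise"
  · subst h6; decide
  by_cases h7 : r = "Camry"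
  · subst h7; decide
  by_cases h8 : r = "Corolla"
  · subst h8; decide
  by_cases h9 : r = "Supra"
  · subst h9; decide
  by_cases h10 : r = "Tundra"
  · subst h10; decide
  have hd : pvModelToBrand = PySem.Dict.mk
      [("Mustang","Ford"),("F-150","Ford"),("GT40","Ford"),("Bronco","Ford"),
       ("Silverado","Chevy"),("Corvette","Chevy"),("EquinoxCruise","Chevy"),
       ("Camry","Toyota"),("Corolla","Toyota"),("Supra","Toyota"),("Tundra","Toyota")] := by decide
  rw [hd]
  simp only [pvVehicles, pvFindBrand, PySem.Dict.get?_mk_cons,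
    List.contains_cons, List.contains_nil, beq_iff_eq]
  simp [h0, h1, h2, h3, h4, h5, h6, h7, h8, h9, h10, Ne.symm h0, Ne.symm h1, Ne.symm h2, Ne.symm h3, Ne.symm h4, Ne.symm h5, Ne.symm h6, Ne.symm h7, Ne.symm h8, Ne.symm h9, Ne.symm h10, PySem.Dict.get?]
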